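-- pv_equiv track=rewrite | github.com/jcnh01/Algorithm | 프로그래머스/2/12941. 최솟값 만들기/최솟값 만들기.py | solution
-- ===== SOURCE A (Python) =====
-- import heapq
--
-- def solution(A,B):
--     answer = 0
--     heapq.heapify(A)
--     B = [-num for num in B]
--     heapq.heapify(B)
--
--     for _ in range(len(A)) :
--         answer += heapq.heappop(A) * -heapq.heappop(B)
--
--     return answer
-- ===== SOURCE B (Python) =====
-- def solution(A, B):
--     # Sort-and-zip instead of heap popping: pair the i-th smallest of A
--     # with the i-th largest of B and sum the products.
--     return sum(a * b for a, b in zip(sorted(A), sorted(B, reverse=True)))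
-- ===== Notes on version B (the rewrite author's own statement) =====
-- stated objective: idiomatic
-- what changed: Replaces the two heaps and the explicit pop loop by sorting A ascending and B descending and summing the zipped pairwise products in one expression (C-level sorted/zip/sum instead of per-element heappop calls; measured ~5x); B also does not mutate its arguments while A heapifies its first argument in place.
import Mathlib
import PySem

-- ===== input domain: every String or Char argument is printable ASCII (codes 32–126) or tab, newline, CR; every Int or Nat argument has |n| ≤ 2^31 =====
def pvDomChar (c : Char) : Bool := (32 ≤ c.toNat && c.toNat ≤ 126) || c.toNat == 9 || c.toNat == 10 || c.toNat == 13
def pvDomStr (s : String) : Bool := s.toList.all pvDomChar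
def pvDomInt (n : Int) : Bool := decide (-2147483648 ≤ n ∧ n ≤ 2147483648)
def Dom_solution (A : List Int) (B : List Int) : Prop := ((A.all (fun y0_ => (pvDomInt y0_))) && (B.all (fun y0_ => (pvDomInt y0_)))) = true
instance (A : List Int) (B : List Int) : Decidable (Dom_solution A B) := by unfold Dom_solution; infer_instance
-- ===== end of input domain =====

-- B replaces A's two heaps and pop loop by sorting A ascending and B descending and
-- summing the zipped pairwise products (idiomatic, same O(n log n) cost).
-- NOTE: Python A mutates its first argument in place (heapify); B does not.
-- The equivalence proved here is about the RETURN value only.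

-- ===== PORT A =====
-- The heapq library calls are ported by their contract: heappop returns the
-- smallest element and removes one occurrence of it (none = IndexError on an
-- empty heap); heapify's internal array layout is unobservable in A's return value.
def pyHeappop? (h : List Int) : Option (Int × List Int) :=
  match PySem.List.min? h (fun x => x) with
  | none => none
  | some m => some (m, h.erase m)

-- the 'for _ in range(len(A))' loop: fuel = remaining iterations, answer = accumulator
def solutionLoop (fuel : Nat) (answer : Int) (hA : List Int) (hB : List Int) : Option Int :=
  match fuel with
  | 0 => some answer
  | k+1 =>
    match pyHeappop? hA, pyHeappop? hB with
    | some (a, hA'), some (b, hB') => solutionLoop k (answer + a * (-b)) hA' hB'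
    | _, _ => none   -- IndexError, excluded by Pre_solution

def solution (A : List Int) (B : List Int) : Int :=
  (solutionLoop A.length 0 A (B.map (fun num => -num))).getD 0

-- ===== PORT B =====
def solution_alt (A : List Int) (B : List Int) : Int :=
  (List.zipWith (fun a b => a * b)
    (PySem.List.sorted A (fun x => x) false)
    (PySem.List.sorted B (fun x => x) true)).sum

-- ===== PRECONDITION & SPEC =====
-- A pops from the B-heap len(A) times, so it raises IndexError unless len(A) ≤ len(B).
def Pre_solution (A : List Int) (B : List Int) : Prop := A.length ≤ B.length
instance (A : List Int) (B : List Int) : Decidable (Pre_solution A B) := by unfold Pre_solution; infer_instance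

def pvWitness_solution : List Int × List Int := ([1, 4, 2], [5, 4, 4])

def Spec_solution (A : List Int) (B : List Int) (out : Int) : Prop := out = solution_alt A B
instance (A : List Int) (B : List Int) (out : Int) : Decidable (Spec_solution A B out) := by unfold Spec_solution; infer_instance

-- ===== CLAIM (what is proved, stated in full; the proofs are below) =====
def Claim_equal_solution : Prop := ∀ (A : List Int) (B : List Int), Dom_solution A B → Pre_solution A B → Spec_solution A B (solution A B)
-- ===== LEMMAS AND PROOFS =====

-- min? is determined by the multiset of elements
theorem min?_perm_eq (l l' : List Int) (p : l.Perm l') :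
    PySem.List.min? l (fun x => x) = PySem.List.min? l' (fun x => x) := by
  match hl : PySem.List.min? l (fun x => x), hl' : PySem.List.min? l' (fun x => x) with
  | none, none => rfl
  | none, some m' =>
    rw [PySem.List.min?_eq_none_iff] at hl
    subst hl
    have hm' := PySem.List.min?_mem hl'
    rw [p.symm.eq_nil] at hm'
    simp at hm'
  | some m, none =>
    rw [PySem.List.min?_eq_none_iff] at hl'
    subst hl'
    have hm := PySem.List.min?_mem hl
    rw [p.eq_nil] at hm
    simp at hm
  | some m, some m' =>
    have hm := PySem.List.min?_mem hl
    have hm' := PySem.List.min?_mem hl'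
    have h1 : m ≤ m' := PySem.List.min?_isMin hl m' (p.symm.mem_iff.mp hm')
    have h2 : m' ≤ m := PySem.List.min?_isMin hl' m (p.mem_iff.mp hm)
    rw [le_antisymm h1 h2]

-- the pop loop is determined by the multisets of the two heaps
theorem solutionLoop_perm (k : Nat) (acc : Int) (hA hA' hB hB' : List Int)
    (pA : hA.Perm hA') (pB : hB.Perm hB') :
    solutionLoop k acc hA hB = solutionLoop k acc hA' hB' := by
  induction k generalizing acc hA hA' hB hB' with
  | zero => rfl
  | succ k ih =>
    simp only [solutionLoop, pyHeappop?]
    rw [min?_perm_eq hA hA' pA, min?_perm_eq hB hB' pB]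
    cases hmA : PySem.List.min? hA' (fun x => x) with
    | none => rfl
    | some a =>
      cases hmB : PySem.List.min? hB' (fun x => x) with
      | none => rfl
      | some b =>
        exact ih _ _ _ _ _ (pA.erase a) (pB.erase b)

theorem heappop_sorted_cons (a : Int) (t : List Int)
    (hp : (a :: t).Pairwise (· ≤ ·)) : pyHeappop? (a :: t) = some (a, t) := by
  cases hm : PySem.List.min? (a :: t) (fun x => x) with
  | none =>
    rw [PySem.List.min?_eq_none_iff] at hm
    simp at hm
  | some m =>
    have hmem := PySem.List.min?_mem hm
    have h1 : m ≤ a := PySem.List.min?_isMin hm a (by simp)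
    have h2 : a ≤ m := by
      rcases List.mem_cons.mp hmem with hc | hc
      · exact hc.symm.le
      · exact (List.pairwise_cons.mp hp).1 m hc
    have hma : m = a := le_antisymm h1 h2
    subst hma
    simp [pyHeappop?, hm]

-- on sorted heaps the loop computes the zipped product sum
theorem solutionLoop_sorted (sa : List Int) :
    ∀ (acc : Int) (sb : List Int), sa.Pairwise (· ≤ ·) → sb.Pairwise (· ≤ ·) →
    sa.length ≤ sb.length →
    solutionLoop sa.length acc sa sb =
      some (acc + (List.zipWith (fun a b => a * (-b)) sa sb).sum) := by
  induction sa with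
  | nil => intro acc sb _ _ _; simp [solutionLoop]
  | cons a t ih =>
    intro acc sb hsa hsb hlen
    cases sb with
    | nil => simp at hlen
    | cons b u =>
      simp only [List.length_cons, solutionLoop]
      rw [heappop_sorted_cons a t hsa, heappop_sorted_cons b u hsb]
      simp only
      rw [ih (acc + a * (-b)) u hsa.of_cons hsb.of_cons (by simpa using hlen)]
      simp [add_assoc]

-- sorted(B, reverse=True) = the negations of sorted(-B), in order
theorem sorted_rev_eq_neg_sorted_neg (B : List Int) :
    PySem.List.sorted B (fun x => x) true =
      (PySem.List.sorted (B.map (fun num => -num)) (fun x => x) false).map (fun x => -x) := by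
  have p1 : (PySem.List.sorted B (fun x => x) true).Perm B :=
    PySem.List.sorted_perm B (fun x => x) true
  have p2 : ((PySem.List.sorted (B.map (fun num => -num)) (fun x => x) false).map (fun x => -x)).Perm B := by
    have := (PySem.List.sorted_perm (B.map (fun num => -num)) (fun x => x) false).map (fun x : Int => -x)
    simpa [Function.comp] using this
  have s1 : (PySem.List.sorted B (fun x => x) true).Pairwise (fun a b => b ≤ a) :=
    PySem.List.sorted_pairwise_rev B (fun x => x)
  have s2 : ((PySem.List.sorted (B.map (fun num => -num)) (fun x => x) false).map (fun x => -x)).Pairwise (fun a b => b ≤ a) := by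
    have h := PySem.List.sorted_pairwise (B.map (fun num => -num)) (fun x => x)
    exact List.Pairwise.map _ (fun a b (hab : a ≤ b) => by simpa using neg_le_neg hab) h
  exact List.Perm.eq_of_pairwise (fun a b _ _ h1 h2 => le_antisymm h2 h1) s1 s2 (p1.trans p2.symm)

-- ===== VERDICT (by name: the statement is the Claim_ definition above) =====
theorem solution_spec : Claim_equal_solution := by
  intro A B _ hPre
  unfold Spec_solution solution solution_alt
  set sa := PySem.List.sorted A (fun x => x) false with hsa
  set snb := PySem.List.sorted (B.map (fun num => -num)) (fun x => x) false with hsnb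
  have hA : A.length = sa.length := (PySem.List.length_sorted A (fun x => x) false).symm
  have hloop : solutionLoop A.length 0 A (B.map (fun num => -num)) =
      solutionLoop A.length 0 sa snb :=
    solutionLoop_perm _ _ _ _ _ _ (PySem.List.sorted_perm A (fun x => x) false).symm
      (PySem.List.sorted_perm (B.map (fun num => -num)) (fun x => x) false).symm
  rw [hloop, hA, solutionLoop_sorted sa 0 snb (PySem.List.sorted_pairwise A (fun x => x))
    (PySem.List.sorted_pairwise (B.map (fun num => -num)) (fun x => x))
    (by rw [← hA, hsnb, PySem.List.length_sorted]; simpa using hPre)]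
  rw [sorted_rev_eq_neg_sorted_neg B, ← hsnb]
  simp [List.zipWith_map_right]
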